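-- pv_equiv track=rewrite | github.com/pypi-data/pypi-mirror-299 | packages/Bhaskara/Bhaskara-4.1.6.4.6.tar.gz/Bhaskara-4.1.6.4.6/Bhaskara/IOSTREAM/InputOutput.py | get_func_param
-- ===== SOURCE A (Python) =====
-- def get_func_param(line) :
-- 	name = ''
-- 	param = ''
-- 	is_found = False
-- 	#f(g(x))
-- 	ob_count = 0
-- 	N = len(line)
-- 	for i in range(N-1) :
-- 		if line[i] == '(' :
-- 			if ob_count == 1 :
-- 				param += line[i]
-- 				continue
-- 			ob_count += 1
-- 			is_found = True
-- 			continue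
-- 		if not is_found :
-- 			name += line[i]
-- 			continue
-- 		param += line[i]
--
-- 	return name,param
-- ===== SOURCE B (Python) =====
-- def get_func_param(line):
--     N = len(line)
--     idx = line.find('(')
--     if idx == -1 or idx >= N - 1:
--         return line[:N - 1], ''
--     return line[:idx], line[idx + 1:N - 1]
-- ===== Notes on version B (the rewrite author's own statement) =====
-- stated objective: simpler
-- what changed: Replaced A's character-by-character state machine (name/param accumulators with is_found and ob_count flags) by a single str.find followed by two slices that drop the final character.
import Mathlib
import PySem

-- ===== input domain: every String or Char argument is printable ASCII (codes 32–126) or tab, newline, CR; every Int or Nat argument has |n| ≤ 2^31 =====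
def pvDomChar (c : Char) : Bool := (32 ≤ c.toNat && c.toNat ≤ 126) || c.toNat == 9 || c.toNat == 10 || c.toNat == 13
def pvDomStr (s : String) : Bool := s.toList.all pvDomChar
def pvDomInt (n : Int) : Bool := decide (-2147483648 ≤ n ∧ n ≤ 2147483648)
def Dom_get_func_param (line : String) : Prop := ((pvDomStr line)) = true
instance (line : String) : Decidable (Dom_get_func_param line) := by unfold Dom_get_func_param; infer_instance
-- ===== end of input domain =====

-- B replaces A's index-driven state-machine loop by a single find + two slices (objective: simpler).

-- ===== PORT A =====
-- literal transliteration of A's loop body; state = (name, param, is_found, ob_count);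
-- pyGetD's default is never read since every i drawn from the range is a valid index
def getFuncParamStepA (cs : List Char)
    (st : List Char × List Char × Bool × Int) (i : Int) :
    List Char × List Char × Bool × Int :=
  let c := PySem.List.pyGetD cs i ' '
  if c = '(' then
    if st.2.2.2 = 1 then (st.1, st.2.1 ++ [c], st.2.2.1, st.2.2.2)
    else (st.1, st.2.1, true, st.2.2.2 + 1)
  else if st.2.2.1 = false then (st.1 ++ [c], st.2.1, st.2.2.1, st.2.2.2)
  else (st.1, st.2.1 ++ [c], st.2.2.1, st.2.2.2)

def get_func_param (line : String) : String × String :=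
  let cs := line.toList
  let N : Int := PySem.Chars.len cs
  let r := (PySem.List.pyRange 0 (N - 1) 1).foldl (getFuncParamStepA cs) ([], [], false, 0)
  (String.ofList r.1, String.ofList r.2.1)

-- ===== PORT B =====
def get_func_param_alt (line : String) : String × String :=
  let cs := line.toList
  let N : Int := PySem.Chars.len cs
  let idx := PySem.Chars.find cs ['(']
  if idx = -1 ∨ N - 1 ≤ idx then
    (String.ofList (PySem.List.slice cs none (some (N - 1))), "")
  else
    (String.ofList (PySem.List.slice cs none (some idx)),
     String.ofList (PySem.List.slice cs (some (idx + 1)) (some (N - 1))))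

-- ===== PRECONDITION & SPEC =====
def Spec_get_func_param (line : String) (out : String × String) : Prop := out = get_func_param_alt line
instance (line : String) (out : String × String) : Decidable (Spec_get_func_param line out) := by unfold Spec_get_func_param; infer_instance

-- ===== CLAIM (what is proved, stated in full; the proofs are below) =====
def Claim_equal_get_func_param : Prop := ∀ (line : String), Dom_get_func_param line → Spec_get_func_param line (get_func_param line)

-- ===== LEMMAS AND PROOFS =====

-- A's loop body as a function of the character itself
def getFuncParamStepC (st : List Char × List Char × Bool × Int) (c : Char) :
    List Char × List Char × Bool × Int :=
  if c = '(' then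
    if st.2.2.2 = 1 then (st.1, st.2.1 ++ [c], st.2.2.1, st.2.2.2)
    else (st.1, st.2.1, true, st.2.2.2 + 1)
  else if st.2.2.1 = false then (st.1 ++ [c], st.2.1, st.2.2.1, st.2.2.2)
  else (st.1, st.2.1 ++ [c], st.2.2.1, st.2.2.2)

lemma stepA_eq_stepC (cs : List Char) (st : List Char × List Char × Bool × Int) (i : Int) :
    getFuncParamStepA cs st i = getFuncParamStepC st (PySem.List.pyGetD cs i ' ') := rfl

lemma stepC_found (name param : List Char) (c : Char) :
    getFuncParamStepC (name, param, true, 1) c = (name, param ++ [c], true, 1) := by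
  simp [getFuncParamStepC]

-- once the '(' has been seen, every further character goes to param
lemma foldC_post (bs : List Char) (name param : List Char) :
    bs.foldl getFuncParamStepC (name, param, true, 1) = (name, param ++ bs, true, 1) := by
  induction bs generalizing param with
  | nil => simp
  | cons c t ih => rw [List.foldl_cons, stepC_found, ih]; simp

-- the whole loop, characterised by the position of the first '(' in the scanned region
lemma foldC_pre (bs : List Char) (name : List Char) :
    bs.foldl getFuncParamStepC (name, [], false, 0) =
      match PySem.List.index? bs '(' with
      | none => (name ++ bs, [], false, 0)
      | some k => (name ++ bs.take k, bs.drop (k + 1), true, 1) := by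
  induction bs generalizing name with
  | nil => simp [PySem.List.index?]
  | cons c t ih =>
      by_cases h : c = '('
      · subst h
        rw [PySem.List.index?_cons_self]
        simp only [List.foldl_cons, getFuncParamStepC]
        norm_num
        simpa using foldC_post t name []
      · rw [PySem.List.index?_cons_of_ne (x := c) (v := '(') (xs := t) h]
        simp only [List.foldl_cons, getFuncParamStepC, if_neg h, if_true]
        rw [ih (name ++ [c])]
        cases hidx : PySem.List.index? t '(' with
        | none => simp
        | some k => simp [List.take_succ_cons, List.drop_succ_cons]

-- [c] is a prefix exactly when the head is c
lemma singleton_prefix_iff (c : Char) (l : List Char) : [c] <+: l ↔ l.head? = some c := by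
  constructor
  · rintro ⟨t, rfl⟩; rfl
  · intro h
    cases l with
    | nil => simp at h
    | cons x t => simp at h; subst h; exact ⟨t, rfl⟩

-- first-occurrence facts for find cs [c]
lemma find_char_spec (cs : List Char) (c : Char)
    (h : PySem.Chars.find cs [c] ≠ -1) :
    (PySem.Chars.find cs [c]).toNat < cs.length ∧
    cs[(PySem.Chars.find cs [c]).toNat]? = some c ∧
    ∀ i < (PySem.Chars.find cs [c]).toNat, cs[i]? ≠ some c := by
  have h0 : 0 ≤ PySem.Chars.find cs [c] := by
    have := PySem.Chars.neg_one_le_find cs [c]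
    omega
  obtain ⟨hp, hmin⟩ := PySem.Chars.find_spec (s := cs) (sub := [c]) h0
  rw [singleton_prefix_iff, List.head?_drop] at hp
  refine ⟨?_, hp, ?_⟩
  · by_contra hge
    rw [List.getElem?_eq_none (Nat.le_of_not_lt hge)] at hp
    simp at hp
  · intro i hi he
    exact hmin i hi ((singleton_prefix_iff c _).2 (by rwa [List.head?_drop]))

-- dropLast = Python's cs[:len(cs)-1]
lemma slice_all_eq_dropLast (cs : List Char) :
    PySem.List.slice cs none (some ((cs.length : Int) - 1)) = cs.dropLast := by
  rcases Nat.eq_zero_or_pos cs.length with h0 | hpos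
  · have : cs = [] := List.length_eq_zero_iff.1 h0
    subst this
    decide
  · rw [PySem.List.slice_to cs (by omega), List.dropLast_eq_take]
    congr 1
    omega

-- the whole statement, at the level of the character list
lemma get_func_param_list (cs : List Char) :
    ((cs.dropLast.foldl getFuncParamStepC ([], [], false, 0)).1,
     (cs.dropLast.foldl getFuncParamStepC ([], [], false, 0)).2.1)
    = (if PySem.Chars.find cs ['('] = -1 ∨ (cs.length : Int) - 1 ≤ PySem.Chars.find cs ['('] then
         (PySem.List.slice cs none (some ((cs.length : Int) - 1)), ([] : List Char))
       else
         (PySem.List.slice cs none (some (PySem.Chars.find cs ['('])),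
          PySem.List.slice cs (some (PySem.Chars.find cs ['('] + 1)) (some ((cs.length : Int) - 1)))) := by
  have hlen : cs.dropLast.length = cs.length - 1 := by simp
  rw [foldC_pre]
  by_cases hf : PySem.Chars.find cs ['('] = -1
  · -- no '(' anywhere in cs, so none in the scanned region either
    have hnot : '(' ∉ cs := by
      have hni := (PySem.Chars.find_eq_neg_one_iff (s := cs) (sub := ['('])).1 hf
      intro hm
      obtain ⟨l1, l2, rfl⟩ := List.append_of_mem hm
      exact hni ⟨l1, l2, by simp⟩
    have hnotbs : '(' ∉ cs.dropLast := fun hm => hnot ((List.dropLast_sublist cs).mem hm)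
    rw [(PySem.List.index?_eq_none_iff cs.dropLast '(').2 hnotbs]
    rw [if_pos (Or.inl hf), slice_all_eq_dropLast]
    simp
  · obtain ⟨hk1, hk2, hk3⟩ := find_char_spec cs '(' hf
    have hj0 : 0 ≤ PySem.Chars.find cs ['('] := by
      have := PySem.Chars.neg_one_le_find cs ['(']
      omega
    have hjk : PySem.Chars.find cs ['('] = ((PySem.Chars.find cs ['(']).toNat : Int) := by omega
    generalize hkdef : (PySem.Chars.find cs ['(']).toNat = k at *
    have hcsk : cs[k]'hk1 = '(' := by
      have := hk2
      rwa [List.getElem?_eq_getElem hk1, Option.some_inj] at this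
    by_cases hlast : k = cs.length - 1
    · -- the first '(' is the excluded last character
      have hnotbs : '(' ∉ cs.dropLast := by
        intro hm
        obtain ⟨i, hi, he⟩ := List.getElem_of_mem hm
        have hic : i < cs.length := by omega
        refine hk3 i (by omega) ?_
        rw [List.getElem?_eq_getElem hic]
        exact congrArg some (by rw [← List.getElem_dropLast hi]; exact he)
      rw [(PySem.List.index?_eq_none_iff cs.dropLast '(').2 hnotbs]
      rw [if_pos (Or.inr (by rw [hjk]; omega)), slice_all_eq_dropLast]
      simp
    · have hklt : k < cs.length - 1 := by omega
      have hkb : k < cs.dropLast.length := by omega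
      have hbsk : cs.dropLast[k]'hkb = '(' := by
        rw [List.getElem_dropLast hkb]
        exact hcsk
      have hidx : PySem.List.index? cs.dropLast '(' = some k := by
        rw [PySem.List.index?_eq_some_iff]
        refine ⟨cs.dropLast.take k, cs.dropLast.drop (k + 1), ?_, by simp; omega, ?_⟩
        · conv_lhs => rw [← List.take_append_drop k cs.dropLast]
          rw [List.drop_eq_getElem_cons hkb, hbsk]
        · intro hm
          obtain ⟨i, hi, he⟩ := List.getElem_of_mem hm
          have hik : i < k := by
            have := hi
            simp [List.length_take] at this
            omega
          have hic : i < cs.length := by omega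
          refine hk3 i hik ?_
          rw [List.getElem_take] at he
          rw [List.getElem?_eq_getElem hic]
          exact congrArg some (by rw [← List.getElem_dropLast (by omega : i < cs.dropLast.length)]; exact he)
      rw [hidx]
      rw [if_neg (by rw [hjk]; omega)]
      have htake : cs.dropLast.take k = PySem.List.slice cs none (some (PySem.Chars.find cs ['('])) := by
        rw [hjk, PySem.List.slice_to cs (by omega), List.dropLast_eq_take, List.take_take]
        simp only [Int.toNat_natCast]
        congr 1
        omega
      have hdrop : cs.dropLast.drop (k + 1)
          = PySem.List.slice cs (some (PySem.Chars.find cs ['('] + 1)) (some ((cs.length : Int) - 1)) := by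
        rw [hjk, PySem.List.slice_toNat cs (by omega) (by omega)]
        rw [List.dropLast_eq_take, List.drop_take]
        congr 1
        omega
      simp [← htake, ← hdrop]

theorem get_func_param_spec_aux (line : String) :
    get_func_param line = get_func_param_alt line := by
  unfold get_func_param get_func_param_alt
  simp only [PySem.Chars.len_eq]
  have hrange :
      (PySem.List.pyRange 0 ((line.toList.length : Int) - 1) 1).foldl
          (getFuncParamStepA line.toList) ([], [], false, 0)
        = line.toList.dropLast.foldl getFuncParamStepC ([], [], false, 0) := by
    have hlen : line.toList.dropLast.length = line.toList.length - 1 := by simp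
    rcases Nat.eq_zero_or_pos line.toList.length with h0 | hpos
    · have hb0 : line.toList.dropLast = [] := by
        have : line.toList.dropLast.length = 0 := by omega
        exact List.length_eq_zero_iff.1 this
      rw [PySem.List.pyRange_one_eq_nil (by omega), hb0]
      simp
    · have hcast : (line.toList.length : Int) - 1 = (line.toList.dropLast.length : Int) := by omega
      rw [hcast]
      rw [PySem.List.foldl_congr_mem _
        (getFuncParamStepA line.toList)
        (fun acc j => getFuncParamStepC acc (PySem.List.pyGetD line.toList.dropLast j ' '))
        _
        (by
          intro acc x hx
          rw [PySem.List.mem_pyRange_one] at hx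
          rw [stepA_eq_stepC]
          congr 1
          have hxb : x < (line.toList.dropLast.length : Int) := hx.2
          have hxn : x.toNat < line.toList.dropLast.length := by omega
          rw [PySem.List.pyGetD_eq_getElem line.toList ' ' hx.1 (by omega),
              PySem.List.pyGetD_eq_getElem line.toList.dropLast ' ' hx.1 (by omega)]
          exact (List.getElem_dropLast hxn).symm)]
      exact PySem.List.foldl_pyRange_zero_pyGetD' line.toList.dropLast ' ' getFuncParamStepC _
  rw [hrange]
  have h := get_func_param_list line.toList
  by_cases hc : PySem.Chars.find line.toList ['('] = -1 ∨
      (line.toList.length : Int) - 1 ≤ PySem.Chars.find line.toList ['(']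
  · rw [if_pos hc] at h ⊢
    injection h with h1 h2
    rw [h1, h2]
  · rw [if_neg hc] at h ⊢
    injection h with h1 h2
    rw [h1, h2]

-- ===== VERDICT =====
theorem get_func_param_spec : Claim_equal_get_func_param := by
  intro line _
  unfold Spec_get_func_param
  exact get_func_param_spec_aux line
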